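-- pv_equiv track=rewrite | github.com/XDhajko/LDAP-Injection-Lab | web/core/views.py | _extract_department_from_dn
-- ===== SOURCE A (Python) =====
-- def _extract_department_from_dn(dn: str) -> str:
--     # look for the first ou after Users or the ou that looks like a department
--     for part in dn.split(','):
--         p = part.strip()
--         if p.lower().startswith('ou=') and 'users' not in p.lower() and 'departments' not in p.lower():
--             return p.split('=', 1)[1]
--     # fallback: try any ou that is not Users/Departments
--     for part in dn.split(','):
--         p = part.strip()
--         if p.lower().startswith('ou='):
--             val = p.split('=', 1)[1]
--             if val.lower() not in ('users', 'departments', 'files'):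
--                 return val
--     return ''
-- ===== SOURCE B (Python) =====
-- def _extract_department_from_dn(dn: str) -> str:
--     cand1 = None
--     cand2 = None
--     for part in dn.split(','):
--         p = part.strip()
--         low = p.lower()
--         if low.startswith('ou='):
--             if cand1 is None and 'users' not in low and 'departments' not in low:
--                 cand1 = p
--             if cand2 is None:
--                 val = p.split('=', 1)[1]
--                 if val.lower() not in ('users', 'departments', 'files'):
--                     cand2 = val
--     if cand1 is not None:
--         return cand1.split('=', 1)[1]
--     if cand2 is not None:
--         return cand2
--     return ''
-- ===== Notes on version B (the rewrite author's own statement) =====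
-- stated objective: alternative
-- what changed: A's two sequential scans over the comma-separated DN parts are replaced by a single pass that tracks the first part matching each of the two conditions and decides between the two candidates after the loop.
import Mathlib
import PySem

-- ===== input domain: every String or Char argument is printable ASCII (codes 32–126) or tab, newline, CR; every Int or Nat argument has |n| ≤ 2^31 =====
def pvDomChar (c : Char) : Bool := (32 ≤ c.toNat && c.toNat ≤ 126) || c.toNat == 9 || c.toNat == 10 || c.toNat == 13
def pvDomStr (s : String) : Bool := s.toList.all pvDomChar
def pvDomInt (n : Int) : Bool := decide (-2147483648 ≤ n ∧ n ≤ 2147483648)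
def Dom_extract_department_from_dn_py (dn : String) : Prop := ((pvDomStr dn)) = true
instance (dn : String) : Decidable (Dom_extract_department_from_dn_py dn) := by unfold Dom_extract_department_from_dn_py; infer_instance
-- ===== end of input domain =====

-- B does one pass over dn.split(',') keeping two first-match candidates instead of A's two sequential scans; objective: alternative decomposition, same cost.

-- ===== PORT A =====
-- dn.split(',') (sep nonempty, so split? is some)
def pvParts (dn : String) : List String := (PySem.Str.split? dn ",").getD []

-- p.split('=', 1)[1] (only evaluated under the guard, where '=' is present, so the index exists)
def pvSplitEq1 (p : String) : String :=
  (PySem.List.pyGet? ((PySem.Str.splitMax? p "=" 1).getD []) 1).getD ""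

-- first loop of A: first part whose strip is lower-'ou='-prefixed and users/departments-free
def pvLoop1 : List String → Option String
  | [] => none
  | part :: rest =>
    let p := PySem.Str.strip part
    if PySem.Str.startswith (PySem.Str.lower p) "ou="
        && !PySem.Str.isIn "users" (PySem.Str.lower p)
        && !PySem.Str.isIn "departments" (PySem.Str.lower p) then
      some (pvSplitEq1 p)
    else pvLoop1 rest

-- second loop of A: first ou= part whose value is not users/departments/files
def pvLoop2 : List String → Option String
  | [] => none
  | part :: rest =>
    let p := PySem.Str.strip part
    if PySem.Str.startswith (PySem.Str.lower p) "ou=" then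
      let val := pvSplitEq1 p
      if !(["users", "departments", "files"].contains (PySem.Str.lower val)) then
        some val
      else pvLoop2 rest
    else pvLoop2 rest

def extract_department_from_dn_py (dn : String) : String :=
  match pvLoop1 (pvParts dn) with
  | some r => r
  | none =>
    match pvLoop2 (pvParts dn) with
    | some v => v
    | none => ""

-- ===== PORT B =====
-- single pass keeping the first candidate for each of the two conditions
def pvBGo : List String → Option String → Option String → Option String × Option String
  | [], c1, c2 => (c1, c2)
  | part :: rest, c1, c2 =>
    let p := PySem.Str.strip part
    let low := PySem.Str.lower p
    if PySem.Str.startswith low "ou=" then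
      let c1' := if c1.isNone && !PySem.Str.isIn "users" low && !PySem.Str.isIn "departments" low
                 then some p else c1
      let c2' := if c2.isNone then
                   let val := pvSplitEq1 p
                   if !(["users", "departments", "files"].contains (PySem.Str.lower val)) then
                     some val
                   else c2
                 else c2
      pvBGo rest c1' c2'
    else pvBGo rest c1 c2

def extract_department_from_dn_py_alt (dn : String) : String :=
  match pvBGo (pvParts dn) none none with
  | (some s, _) => pvSplitEq1 s
  | (none, some v) => v
  | (none, none) => ""

-- ===== PRECONDITION & SPEC =====
def Spec_extract_department_from_dn_py (dn : String) (out : String) : Prop := out = extract_department_from_dn_py_alt dn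
instance (dn : String) (out : String) : Decidable (Spec_extract_department_from_dn_py dn out) := by unfold Spec_extract_department_from_dn_py; infer_instance

-- ===== CLAIM (what is proved, stated in full; the proofs are below) =====
def Claim_equal_extract_department_from_dn_py : Prop := ∀ (dn : String), Dom_extract_department_from_dn_py dn → Spec_extract_department_from_dn_py dn (extract_department_from_dn_py dn)

-- ===== LEMMAS AND PROOFS =====

-- what B's final match computes from pvBGo's state, in terms of A's two loops
def pvFinish (parts : List String) (c1 c2 : Option String) : String :=
  match c1 with
  | some s => pvSplitEq1 s
  | none =>
    match pvLoop1 parts with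
    | some r => r
    | none =>
      match c2 with
      | some v => v
      | none => (pvLoop2 parts).getD ""

lemma pvBGo_finish (parts : List String) (c1 c2 : Option String) :
    (match pvBGo parts c1 c2 with
     | (some s, _) => pvSplitEq1 s
     | (none, some v) => v
     | (none, none) => "") = pvFinish parts c1 c2 := by
  induction parts generalizing c1 c2 with
  | nil =>
    cases c1 <;> cases c2 <;> simp [pvBGo, pvFinish, pvLoop1, pvLoop2]
  | cons part rest ih =>
    simp only [pvBGo]
    by_cases hs : PySem.Str.startswith (PySem.Str.lower (PySem.Str.strip part)) "ou=" = true
    · simp only [hs, if_true]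
      rw [ih]
      cases c1 <;> cases c2 <;>
        simp only [pvFinish, pvLoop1, pvLoop2, hs, Option.isNone, Bool.true_and,
          Bool.false_and, if_true, Bool.and_eq_true] <;>
        split_ifs <;>
        simp_all [pvFinish, Option.getD]
    · have hsr : PySem.Str.startswith (PySem.Str.lower (PySem.Str.strip part)) "ou=" = false := by
        simpa using hs
      have hsc : PySem.Chars.startswith (PySem.Chars.lower (PySem.Chars.strip part.toList))
          ['o', 'u', '='] = false := by simpa using hs
      rw [hsr]
      simp only [Bool.false_eq_true, if_false]
      rw [ih]
      cases c1 <;> cases c2 <;>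
        simp [pvFinish, pvLoop1, pvLoop2, hsc]

-- ===== VERDICT (by name: the statement is the Claim_ definition above) =====
theorem extract_department_from_dn_py_spec : Claim_equal_extract_department_from_dn_py := by
  intro dn _
  unfold Spec_extract_department_from_dn_py extract_department_from_dn_py extract_department_from_dn_py_alt
  rw [pvBGo_finish]
  simp only [pvFinish]
  cases h1 : pvLoop1 (pvParts dn) <;>
    cases h2 : pvLoop2 (pvParts dn) <;> simp [Option.getD]
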